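-- pv_equiv track=rewrite | github.com/Markus-Ende/adventofcode2019 | src/day10/monitoring_station.py | can_detect
-- ===== SOURCE A (Python) =====
-- from math import gcd, pi, atan2, degrees
--
-- def can_detect(asteroids, station, target):
--     delta = (target[0] - station[0], target[1] - station[1])
--     divisor = gcd(delta[0], delta[1])
--     if (divisor == 1):
--         return True
--     delta_step = (delta[0] // divisor, delta[1] // divisor)
--     check_pos = (station[0] + delta_step[0], station[1] + delta_step[1])
--     while (check_pos != target):
--         if (check_pos in asteroids):
--             return False
--         check_pos = (check_pos[0] + delta_step[0],
--                      check_pos[1] + delta_step[1])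
--     return True
-- ===== SOURCE B (Python) =====
-- from math import gcd
--
-- def can_detect(asteroids, station, target):
--     delta = (target[0] - station[0], target[1] - station[1])
--     divisor = gcd(delta[0], delta[1])
--     if divisor == 1:
--         return True
--     step = (delta[0] // divisor, delta[1] // divisor)
--     for a in asteroids:
--         da = (a[0] - station[0], a[1] - station[1])
--         k = da[0] // step[0] if step[0] != 0 else da[1] // step[1]
--         if 1 <= k < divisor and k * step[0] == da[0] and k * step[1] == da[1]:
--             return False
--     return True
-- ===== Notes on version B (the rewrite author's own statement) =====
-- stated objective: alternative
-- what changed: B replaces A's step-by-step walk along the segment (membership test at every intermediate lattice point) by a single pass over the asteroid list, deciding arithmetically for each asteroid whether it is a strictly interior integer multiple of the primitive step.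
import Mathlib
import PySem

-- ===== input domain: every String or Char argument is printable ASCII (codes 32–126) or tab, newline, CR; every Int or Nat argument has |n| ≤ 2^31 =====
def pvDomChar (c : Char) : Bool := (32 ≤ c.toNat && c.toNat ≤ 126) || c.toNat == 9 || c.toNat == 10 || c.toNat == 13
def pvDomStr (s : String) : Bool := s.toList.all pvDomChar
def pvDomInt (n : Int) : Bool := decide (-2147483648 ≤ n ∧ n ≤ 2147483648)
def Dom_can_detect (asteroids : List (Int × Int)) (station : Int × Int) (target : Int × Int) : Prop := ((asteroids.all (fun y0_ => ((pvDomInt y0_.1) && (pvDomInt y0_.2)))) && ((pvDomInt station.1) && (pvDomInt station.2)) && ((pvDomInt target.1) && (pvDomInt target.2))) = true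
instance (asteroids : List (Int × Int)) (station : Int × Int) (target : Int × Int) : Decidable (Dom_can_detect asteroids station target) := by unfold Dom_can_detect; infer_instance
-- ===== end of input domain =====

-- B replaces A's step-by-step walk along the segment (membership test at every lattice
-- point between station and target) by a single pass over the asteroid list that decides
-- arithmetically whether each asteroid is a strictly interior multiple of the primitive step.

-- ===== PORT A =====
-- the while loop of A; fuel bounds the number of iterations (it is always sufficient
-- on inputs satisfying Pre_, where the walk reaches `target` after divisor-1 steps)
def can_detect_loop (asteroids : List (Int × Int)) (target : Int × Int) (step : Int × Int) :
    Nat → (Int × Int) → Bool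
  | 0, _ => true
  | fuel + 1, pos =>
    if pos = target then true
    else if pos ∈ asteroids then false
    else can_detect_loop asteroids target step fuel (pos.1 + step.1, pos.2 + step.2)

def can_detect (asteroids : List (Int × Int)) (station : Int × Int) (target : Int × Int) : Bool :=
  let delta : Int × Int := (target.1 - station.1, target.2 - station.2)
  let divisor : Int := (Int.gcd delta.1 delta.2 : Int)
  if divisor = 1 then true
  else if divisor = 0 then true   -- Python raises ZeroDivisionError here; excluded by Pre_
  else
    let step : Int × Int := (PySem.Int.floordiv delta.1 divisor, PySem.Int.floordiv delta.2 divisor)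
    can_detect_loop asteroids target step divisor.toNat (station.1 + step.1, station.2 + step.2)

-- ===== PORT B =====
-- the for loop of B with its early return
def can_detect_alt_loop (station : Int × Int) (step : Int × Int) (divisor : Int) :
    List (Int × Int) → Bool
  | [] => true
  | a :: rest =>
    let da : Int × Int := (a.1 - station.1, a.2 - station.2)
    let k : Int := if step.1 ≠ 0 then PySem.Int.floordiv da.1 step.1
                   else PySem.Int.floordiv da.2 step.2
    if 1 ≤ k ∧ k < divisor ∧ k * step.1 = da.1 ∧ k * step.2 = da.2 then false
    else can_detect_alt_loop station step divisor rest

def can_detect_alt (asteroids : List (Int × Int)) (station : Int × Int) (target : Int × Int) : Bool :=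
  let delta : Int × Int := (target.1 - station.1, target.2 - station.2)
  let divisor : Int := (Int.gcd delta.1 delta.2 : Int)
  if divisor = 1 then true
  else if divisor = 0 then true   -- Python raises ZeroDivisionError here; excluded by Pre_
  else
    let step : Int × Int := (PySem.Int.floordiv delta.1 divisor, PySem.Int.floordiv delta.2 divisor)
    can_detect_alt_loop station step divisor asteroids

-- ===== PRECONDITION & SPEC =====
-- Pre_ excludes only station = target, where both Pythons raise ZeroDivisionError
-- (gcd(0,0) = 0 is used as a divisor).
def Pre_can_detect (asteroids : List (Int × Int)) (station : Int × Int) (target : Int × Int) : Prop :=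
  station ≠ target
instance (asteroids : List (Int × Int)) (station : Int × Int) (target : Int × Int) : Decidable (Pre_can_detect asteroids station target) := by unfold Pre_can_detect; infer_instance
def pvWitness_can_detect : (List (Int × Int)) × (Int × Int) × (Int × Int) :=
  ([(1, 1), (2, 2)], (0, 0), (4, 4))
def Spec_can_detect (asteroids : List (Int × Int)) (station : Int × Int) (target : Int × Int) (out : Bool) : Prop := out = can_detect_alt asteroids station target
instance (asteroids : List (Int × Int)) (station : Int × Int) (target : Int × Int) (out : Bool) : Decidable (Spec_can_detect asteroids station target out) := by unfold Spec_can_detect; infer_instance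

-- ===== CLAIM (what is proved, stated in full; the proofs are below) =====
def Claim_equal_can_detect : Prop := ∀ (asteroids : List (Int × Int)) (station : Int × Int) (target : Int × Int), Dom_can_detect asteroids station target → Pre_can_detect asteroids station target → Spec_can_detect asteroids station target (can_detect asteroids station target)

-- ===== LEMMAS AND PROOFS =====

-- exact division by the gcd: divisor * step = delta
theorem gcd_mul_fdiv (a : Int) (b : Int) :
    (Int.gcd a b : Int) * PySem.Int.floordiv a (Int.gcd a b : Int) = a := by
  have h : (Int.gcd a b : Int) ∣ a := Int.gcd_dvd_left a b
  simpa [PySem.Int.floordiv] using Int.mul_fdiv_cancel' h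

theorem gcd_mul_fdiv' (a : Int) (b : Int) :
    (Int.gcd a b : Int) * PySem.Int.floordiv b (Int.gcd a b : Int) = b := by
  have h : (Int.gcd a b : Int) ∣ b := Int.gcd_dvd_right a b
  simpa [PySem.Int.floordiv] using Int.mul_fdiv_cancel' h

-- with a nonzero step, equal points on the ray have equal parameters
theorem step_inj (st : Int × Int) (s : Int × Int) (hs : s.1 ≠ 0 ∨ s.2 ≠ 0)
    (j k : Int) (h : (st.1 + j * s.1, st.2 + j * s.2) = (st.1 + k * s.1, st.2 + k * s.2)) :
    j = k := by
  obtain ⟨h1, h2⟩ := Prod.mk.injEq .. ▸ h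
  rcases hs with hs | hs
  · have : j * s.1 = k * s.1 := by omega
    exact mul_right_cancel₀ hs this
  · have : j * s.2 = k * s.2 := by omega
    exact mul_right_cancel₀ hs this

-- characterisation of A's walk
theorem loopA_spec (asteroids : List (Int × Int)) (st : Int × Int) (s : Int × Int)
    (g : Int) (hs : s.1 ≠ 0 ∨ s.2 ≠ 0) :
    ∀ (fuel : Nat) (k : Int), 1 ≤ k → k + fuel = g + 1 →
      (can_detect_loop asteroids (st.1 + g * s.1, st.2 + g * s.2) s fuel
          (st.1 + k * s.1, st.2 + k * s.2) = true ↔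
        ∀ j : Int, k ≤ j → j < g → (st.1 + j * s.1, st.2 + j * s.2) ∉ asteroids) := by
  intro fuel
  induction fuel with
  | zero =>
    intro k hk hkf
    have hkg : k = g + 1 := by omega
    simp only [can_detect_loop]
    constructor
    · intro _ j hj1 hj2; omega
    · intro _; trivial
  | succ n ih =>
    intro k hk hkf
    by_cases hkeq : k = g
    · subst hkeq
      simp only [can_detect_loop]
      constructor
      · intro _ j hj1 hj2; omega
      · intro _; trivial
    · have hklt : k < g := by omega
      have hne : (st.1 + k * s.1, st.2 + k * s.2) ≠ (st.1 + g * s.1, st.2 + g * s.2) := by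
        intro h; exact hkeq (step_inj st s hs k g h)
      simp only [can_detect_loop, if_neg hne]
      by_cases hmem : (st.1 + k * s.1, st.2 + k * s.2) ∈ asteroids
      · simp only [if_pos hmem]
        constructor
        · intro h; cases h
        · intro h; exact absurd hmem (h k le_rfl hklt)
      · simp only [if_neg hmem]
        have hrw : (st.1 + k * s.1 + s.1, st.2 + k * s.2 + s.2)
            = (st.1 + (k + 1) * s.1, st.2 + (k + 1) * s.2) := by
          rw [Prod.mk.injEq]; exact ⟨by ring, by ring⟩
        rw [hrw, ih (k + 1) (by omega) (by omega)]
        constructor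
        · intro h j hj1 hj2
          by_cases hjk : j = k
          · subst hjk; exact hmem
          · exact h j (by omega) hj2
        · intro h j hj1 hj2; exact h j (by omega) hj2

-- characterisation of B's scan
theorem loopB_spec (st : Int × Int) (s : Int × Int) (g : Int) (hs : s.1 ≠ 0 ∨ s.2 ≠ 0) :
    ∀ l : List (Int × Int),
      (can_detect_alt_loop st s g l = true ↔
        ∀ a ∈ l, ¬ ∃ k : Int, 1 ≤ k ∧ k < g ∧ a = (st.1 + k * s.1, st.2 + k * s.2)) := by
  intro l
  induction l with
  | nil => simp [can_detect_alt_loop]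
  | cons a rest ih =>
    simp only [can_detect_alt_loop]
    set k0 : Int := if s.1 ≠ 0 then PySem.Int.floordiv (a.1 - st.1) s.1
                    else PySem.Int.floordiv (a.2 - st.2) s.2 with hk0
    have hcond : (1 ≤ k0 ∧ k0 < g ∧ k0 * s.1 = a.1 - st.1 ∧ k0 * s.2 = a.2 - st.2) ↔
        ∃ k : Int, 1 ≤ k ∧ k < g ∧ a = (st.1 + k * s.1, st.2 + k * s.2) := by
      constructor
      · rintro ⟨h1, h2, h3, h4⟩
        refine ⟨k0, h1, h2, ?_⟩
        obtain ⟨x, y⟩ := a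
        simp only at h3 h4
        simp only [Prod.mk.injEq]
        omega
      · rintro ⟨k, h1, h2, rfl⟩
        have hda1 : (st.1 + k * s.1, st.2 + k * s.2).1 - st.1 = k * s.1 := by ring
        have hda2 : (st.1 + k * s.1, st.2 + k * s.2).2 - st.2 = k * s.2 := by ring
        have hk : k0 = k := by
          rw [hk0, hda1, hda2]
          by_cases h : s.1 ≠ 0
          · rw [if_pos h]; simp [PySem.Int.floordiv, Int.mul_fdiv_cancel _ h]
          · rw [if_neg h]
            have hs2 : s.2 ≠ 0 := by tauto
            simp [PySem.Int.floordiv, Int.mul_fdiv_cancel _ hs2]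
        rw [hk]; exact ⟨h1, h2, by rw [hda1], by rw [hda2]⟩
    split_ifs with h
    · simp only [false_iff, not_forall]
      exact ⟨a, List.mem_cons_self .., by rw [← hcond] at *; tauto⟩
    · rw [ih]
      constructor
      · intro hr b hb
        rcases List.mem_cons.mp hb with rfl | hb
        · rw [← hcond]; exact h
        · exact hr b hb
      · intro hr b hb; exact hr b (List.mem_cons_of_mem _ hb)

-- ===== VERDICT (by name: the statement is the Claim_ definition above) =====
theorem can_detect_spec : Claim_equal_can_detect := by
  intro asteroids st tg _ hpre
  obtain ⟨sx, sy⟩ := st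
  obtain ⟨tx, ty⟩ := tg
  unfold Spec_can_detect can_detect can_detect_alt
  simp only
  set d1 : Int := tx - sx with hd1
  set d2 : Int := ty - sy with hd2
  set g : Int := (Int.gcd d1 d2 : Int) with hg
  by_cases h1 : g = 1
  · simp [h1]
  · have hpre' : sx ≠ tx ∨ sy ≠ ty := by
      by_contra h
      push_neg at h
      exact hpre (by simp [h.1, h.2])
    have hd : d1 ≠ 0 ∨ d2 ≠ 0 := by
      rcases hpre' with h | h
      · left; omega
      · right; omega
    have h0 : g ≠ 0 := by
      intro h
      rw [hg] at h
      have hz : Int.gcd d1 d2 = 0 := by exact_mod_cast h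
      rcases hd with hd | hd
      · exact hd (Int.eq_zero_of_gcd_eq_zero_left hz)
      · exact hd (Int.eq_zero_of_gcd_eq_zero_right hz)
    simp only [if_neg h1, if_neg h0]
    set s1 : Int := PySem.Int.floordiv d1 g with hs1
    set s2 : Int := PySem.Int.floordiv d2 g with hs2
    have hgs1 : g * s1 = d1 := by rw [hs1, hg]; exact gcd_mul_fdiv d1 d2
    have hgs2 : g * s2 = d2 := by rw [hs2, hg]; exact gcd_mul_fdiv' d1 d2
    have hs : s1 ≠ 0 ∨ s2 ≠ 0 := by
      rcases hd with hd | hd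
      · left; intro h; rw [h, mul_zero] at hgs1; exact hd hgs1.symm
      · right; intro h; rw [h, mul_zero] at hgs2; exact hd hgs2.symm
    have hgnn : (0:Int) ≤ g := by rw [hg]; exact_mod_cast Nat.zero_le _
    have htg : (tx, ty) = (sx + g * s1, sy + g * s2) := by
      simp only [Prod.mk.injEq]; omega
    have hstart : (sx + s1, sy + s2) = (sx + 1 * s1, sy + 1 * s2) := by
      simp
    have hfuel : (1:Int) + g.toNat = g + 1 := by omega
    rw [htg, hstart]
    have hA := loopA_spec asteroids (sx, sy) (s1, s2) g hs g.toNat 1 le_rfl hfuel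
    have hB := loopB_spec (sx, sy) (s1, s2) g hs asteroids
    simp only at hA hB
    have hiff : (∀ j : Int, 1 ≤ j → j < g → (sx + j * s1, sy + j * s2) ∉ asteroids) ↔
        (∀ a ∈ asteroids, ¬ ∃ k : Int, 1 ≤ k ∧ k < g ∧ a = (sx + k * s1, sy + k * s2)) := by
      constructor
      · rintro h a ha ⟨k, hk1, hk2, rfl⟩
        exact h k hk1 hk2 ha
      · intro h j hj1 hj2 hmem
        exact h _ hmem ⟨j, hj1, hj2, rfl⟩
    exact Bool.eq_iff_iff.mpr (hA.trans (hiff.trans hB.symm))
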